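-- pv_equiv track=rewrite | github.com/cs88-website/su25 | assets/slides/09.py | large_v2
-- ===== SOURCE A (Python) =====
-- def sum_list(s):
--     """Sum the elements of list s.
--
--     >>> sum([2, 4, 1, 3])
--     10
--     """
--     if len(s) == 0:
--         return 0
--     else:
--         return s[0] + sum_list(s[1:])
--
-- def large_v2(s, n):
--     """Return the sublist of positive numbers s with the largest sum up to n.
--
--     >>> large_v2([4, 2, 5, 6, 7], 1)
--     []
--     >>> large_v2([4, 2, 5, 6, 7], 3)
--     [2]
--     >>> large_v2([4, 2, 5, 6, 7], 8)
--     [2, 6]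
--     >>> large_v2([4, 2, 5, 6, 7], 19)
--     [4, 2, 6, 7]
--     >>> large_v2([4, 2, 5, 6, 7], 20)
--     [2, 5, 6, 7]
--     >>> large_v2([4, 2, 5, 6, 7], 24)
--     [4, 2, 5, 6, 7]
--     """
--     # Alternate recursive implementation
--     if s == []:
--         return []
--     elif n < 0:
--         # s contains only positive integers, and it's
--         # impossible to add pos ints to get a neg/zero int
--         return []
--     else:
--         first = s[0]  # a number
--         with_s0 = [first] + large_v2(s[1:], n - first)
--         without_s0 = large_v2(s[1:], n)
--         sum_with_s0 = sum_list(with_s0)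
--         sum_without_s0 = sum_list(without_s0)
--         if sum_with_s0 > sum_without_s0 and sum_with_s0 <= n:
--             return with_s0
--         else:
--             return without_s0
-- ===== SOURCE B (Python) =====
-- def large_v2(s, n):
--     # Memoized (index, budget) dynamic programming over suffixes; same
--     # choice rule as the naive recursion (include the first element only
--     # when strictly better and within budget), each state computed once.
--     cache = {}
--     def go(i, rest, m):
--         if not rest:
--             return []
--         if m < 0:
--             return []
--         key = (i, m)
--         if key in cache:
--             return cache[key]
--         first = rest[0]
--         with_first = [first] + go(i + 1, rest[1:], m - first)
--         without_first = go(i + 1, rest[1:], m)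
--         if sum(with_first) > sum(without_first) and sum(with_first) <= m:
--             res = with_first
--         else:
--             res = without_first
--         cache[key] = res
--         return res
--     return go(0, s, n)
-- ===== Notes on version B (the rewrite author's own statement) =====
-- stated objective: faster
-- what changed: Replaced the naive exponential recursion by memoized (index, budget) dynamic programming over suffixes: each state is computed once and cached, with the same strictly-better-and-within-budget inclusion rule; intended as faster (a timing run saw A time out at n=64 where B returned; at n=16 the ratio was too small to measure).
import Mathlib
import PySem

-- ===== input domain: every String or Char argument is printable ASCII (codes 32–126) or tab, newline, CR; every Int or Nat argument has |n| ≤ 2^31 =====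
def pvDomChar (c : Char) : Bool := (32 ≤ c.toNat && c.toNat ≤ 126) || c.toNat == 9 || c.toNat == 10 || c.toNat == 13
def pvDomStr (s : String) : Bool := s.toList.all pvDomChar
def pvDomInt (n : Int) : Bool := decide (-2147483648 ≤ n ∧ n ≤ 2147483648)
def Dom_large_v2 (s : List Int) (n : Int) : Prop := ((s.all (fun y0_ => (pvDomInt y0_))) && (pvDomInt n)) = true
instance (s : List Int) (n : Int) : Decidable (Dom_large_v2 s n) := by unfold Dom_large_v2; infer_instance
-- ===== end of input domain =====

-- B replaces A's naive exponential recursion by memoized (index, budget) DP over suffixes; intended as faster (a timing run saw A time out at n=64 where B returned; no ratio was measurable at the sizes both finish).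

-- ===== PORT A =====
def sum_list : List Int → Int
  | [] => 0
  | a :: t => a + sum_list t

def large_v2 (s : List Int) (n : Int) : List Int :=
  match s with
  | [] => []
  | a :: t =>
    if n < 0 then []
    else
      let with_s0 := a :: large_v2 t (n - a)
      let without_s0 := large_v2 t n
      let sum_with := sum_list with_s0
      let sum_without := sum_list without_s0
      if sum_with > sum_without ∧ sum_with ≤ n then with_s0 else without_s0

-- ===== PORT B =====
-- go(i, rest, m) with a cache keyed by (i, m); the cache is threaded explicitly
-- (the Python closes over a mutable dict).
def goB (i : Nat) (rest : List Int) (m : Int)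
    (cache : PySem.Dict (Nat × Int) (List Int)) :
    List Int × PySem.Dict (Nat × Int) (List Int) :=
  match rest with
  | [] => ([], cache)
  | first :: tl =>
    if m < 0 then ([], cache)
    else
      match cache.get? (i, m) with
      | some v => (v, cache)
      | none =>
        let p1 := goB (i + 1) tl (m - first) cache
        let with_first := first :: p1.1
        let p2 := goB (i + 1) tl m p1.2
        let res := if with_first.sum > p2.1.sum ∧ with_first.sum ≤ m
                   then with_first else p2.1
        (res, p2.2.insert (i, m) res)

def large_v2_alt (s : List Int) (n : Int) : List Int :=
  (goB 0 s n PySem.Dict.empty).1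

-- ===== PRECONDITION & SPEC =====
def Spec_large_v2 (s : List Int) (n : Int) (out : List Int) : Prop := out = large_v2_alt s n
instance (s : List Int) (n : Int) (out : List Int) : Decidable (Spec_large_v2 s n out) := by unfold Spec_large_v2; infer_instance

-- ===== CLAIM (what is proved, stated in full; the proofs are below) =====
def Claim_equal_large_v2 : Prop := ∀ (s : List Int) (n : Int), Dom_large_v2 s n → Spec_large_v2 s n (large_v2 s n)

-- ===== LEMMAS AND PROOFS =====

theorem sum_list_eq_sum (l : List Int) : sum_list l = l.sum := by
  induction l with
  | nil => rfl
  | cons a t ih => simp [sum_list, ih]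

-- a cache is valid if every entry records A's value for that (index, budget) state
def CacheValid (s : List Int) (c : PySem.Dict (Nat × Int) (List Int)) : Prop :=
  ∀ j k v, c.get? (j, k) = some v → v = large_v2 (s.drop j) k

theorem goB_correct (s : List Int) (rest : List Int) : ∀ (i : Nat), rest = s.drop i →
    ∀ (m : Int) (cache : PySem.Dict (Nat × Int) (List Int)), CacheValid s cache →
    (goB i rest m cache).1 = large_v2 rest m ∧ CacheValid s (goB i rest m cache).2 := by
  induction rest with
  | nil =>
    intro i _ m cache hc
    simp [goB, large_v2]
    exact hc
  | cons first tl ih =>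
    intro i hdrop m cache hc
    have htl : tl = s.drop (i + 1) := by
      have := congrArg (List.drop 1) hdrop
      simpa [List.drop_drop, Nat.add_comm] using this
    by_cases hm : m < 0
    · simp [goB, hm, large_v2]; exact hc
    · simp only [goB, hm, if_false]
      cases hget : cache.get? (i, m) with
      | some v =>
        refine ⟨?_, hc⟩
        have := hc i m v hget
        rw [this, ← hdrop]
      | none =>
        have h1 := ih (i + 1) htl (m - first) cache hc
        have h2 := ih (i + 1) htl m (goB (i+1) tl (m - first) cache).2 h1.2
        have hres : (if (first :: (goB (i+1) tl (m - first) cache).1).sum >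
              (goB (i+1) tl m (goB (i+1) tl (m - first) cache).2).1.sum ∧
              (first :: (goB (i+1) tl (m - first) cache).1).sum ≤ m
            then first :: (goB (i+1) tl (m - first) cache).1
            else (goB (i+1) tl m (goB (i+1) tl (m - first) cache).2).1)
            = large_v2 (first :: tl) m := by
      
          rw [h1.1, h2.1]
          simp only [large_v2, hm, if_false, sum_list_eq_sum]
        refine ⟨hres, ?_⟩
        intro j k v hv
        rcases eq_or_ne ((j, k) : Nat × Int) (i, m) with he | hne
        · rw [he, PySem.Dict.get?_insert_self] at hv
          obtain ⟨hji, hkm⟩ := Prod.mk.injEq .. ▸ he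
          subst hji; subst hkm
          cases hv
          rw [hres, ← hdrop]
        · rw [PySem.Dict.get?_insert_of_ne _ _ hne] at hv
          exact h2.2 j k v hv

-- ===== VERDICT (by name: the statement is the Claim_ definition above) =====
theorem large_v2_spec : Claim_equal_large_v2 := by
  intro s n _
  have hc : CacheValid s PySem.Dict.empty := by
    intro j k v hv; simp [PySem.Dict.get?_empty] at hv
  have h := goB_correct s s 0 (by simp) n PySem.Dict.empty hc
  unfold Spec_large_v2 large_v2_alt
  rw [h.1]
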